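-- pv_equiv track=rewrite | github.com/weibin666/wb_algorithm | hw/双指针/02_统计平衡三元组.py | countBalancedTriplets
-- ===== SOURCE A (Python) =====
-- def countBalancedTriplets(arr, numA, numB, numC):
--     n = len(arr)  # 获取数组长度
--     count = 0     # 初始化满足条件的三元组计数器
--
--     # 遍历数组的中间位置 j，确保 i < j < k
--     for j in range(1, n - 1):
--         mid = arr[j]  # 当前中间值
--
--         # 构造左侧所有满足 |arr[i] - arr[j]| <= numA 的 i 值集合
--         valid_i = sorted(x for x in arr[:j] if abs(x - mid) <= numA)
--
--         # 构造右侧所有满足 |arr[j] - arr[k]| <= numB 的 k 值集合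
--         valid_k = sorted(x for x in arr[j+1:] if abs(x - mid) <= numB)
--
--         # 双指针初始化，准备查找满足 |arr[i] - arr[k]| <= numC 的配对数
--         l = r = 0
--
--         # 对于每一个合法的 i 值，统计有多少个合法的 k 值满足最终条件
--         for i_val in valid_i:
--             # 移动左指针 l，使得 valid_k[l] >= i_val - numC
--             while l < len(valid_k) and valid_k[l] < i_val - numC:
--                 l += 1
--             # 移动右指针 r，使得 valid_k[r] <= i_val + numC
--             while r < len(valid_k) and valid_k[r] <= i_val + numC:
--                 r += 1
--             # 统计所有在 [i_val - numC, i_val + numC] 范围内的 k 值个数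
--             count += r - l
--
--     return count  # 返回最终满足条件的三元组数量
-- ===== SOURCE B (Python) =====
-- def countBalancedTriplets(arr, numA, numB, numC):
--     n = len(arr)
--     count = 0
--     for j in range(1, n - 1):
--         for i in range(j):
--             for k in range(j + 1, n):
--                 if abs(arr[i] - arr[j]) <= numA and abs(arr[j] - arr[k]) <= numB and abs(arr[i] - arr[k]) <= numC:
--                     count += 1
--     return count
-- ===== Notes on version B (the rewrite author's own statement) =====
-- stated objective: simpler
-- what changed: Replaced the per-j sort + two-pointer sliding window with a plain brute-force triple loop over i<j<k that tests the three absolute-difference conditions directly; no sorting and no pointer state.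
-- intended difference: When numC < 0 and some triple i<j<k satisfies |arr[i]-arr[j]|<=numA, |arr[j]-arr[k]|<=numB and arr[i]+numC < arr[k] < arr[i]-numC, A's two-pointer window inverts (r < l) and A returns a negative count (e.g. -1 on ([0,0,1],0,1,-2)); B returns 0, the intended number of triples, since |x-y|<=numC is unsatisfiable for negative numC. — e.g. on countBalancedTriplets([0, 0, 1], 0, 1, -2): A returns -1, B returns 0
import Mathlib
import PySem

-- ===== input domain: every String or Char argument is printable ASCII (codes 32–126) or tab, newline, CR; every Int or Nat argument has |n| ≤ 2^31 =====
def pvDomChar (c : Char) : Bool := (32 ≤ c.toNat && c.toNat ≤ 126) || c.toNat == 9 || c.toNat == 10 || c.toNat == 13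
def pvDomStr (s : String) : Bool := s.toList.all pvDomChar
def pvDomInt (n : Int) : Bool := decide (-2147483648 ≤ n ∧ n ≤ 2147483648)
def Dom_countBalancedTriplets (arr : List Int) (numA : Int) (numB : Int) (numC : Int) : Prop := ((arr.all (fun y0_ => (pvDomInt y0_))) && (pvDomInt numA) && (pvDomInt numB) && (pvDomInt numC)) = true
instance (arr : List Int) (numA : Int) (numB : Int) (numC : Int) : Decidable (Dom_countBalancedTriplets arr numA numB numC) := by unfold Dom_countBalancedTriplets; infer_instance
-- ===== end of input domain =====

-- B replaces A's per-j sort + two-pointer window with a plain brute-force triple loop (simpler, not faster);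
-- on numC < 0 A's window can invert and return a negative count, where B returns the intended 0 (see D_ below).

-- ===== PORT A =====
-- one 'while l/r < len(valid_k) and <p>(valid_k[l/r]): l/r += 1' loop, with its test p passed in;
-- structural fuel encoding (fuel = len(valid_k) - l bounds the remaining iterations exactly)
def pvAdvFuel (vk : List Int) (p : Int → Bool) : Nat → Nat → Nat
  | 0, l => l
  | fuel + 1, l =>
      if h : l < vk.length then
        if p (vk[l]'h) then pvAdvFuel vk p fuel (l + 1) else l
      else l

def pvAdv (vk : List Int) (p : Int → Bool) (l : Nat) : Nat :=
  pvAdvFuel vk p (vk.length - l) l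

-- 'for i_val in valid_i: …' with state (l, r, count)
def pvInnerA (vk : List Int) (numC : Int) : List Int → Nat → Nat → Int → Int
  | [], _, _, count => count
  | iv :: rest, l, r, count =>
      let l' := pvAdv vk (fun x => decide (x < iv - numC)) l
      let r' := pvAdv vk (fun x => decide (x ≤ iv + numC)) r
      pvInnerA vk numC rest l' r' (count + ((r' : Int) - (l' : Int)))

def countBalancedTriplets (arr : List Int) (numA : Int) (numB : Int) (numC : Int) : Int :=
  let n : Int := arr.length
  (PySem.List.pyRange 1 (n - 1) 1).foldl (fun count j =>
    let mid := PySem.List.pyGetD arr j 0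
    let valid_i := PySem.List.sorted ((PySem.List.slice arr none (some j)).filter
      (fun x => decide (|x - mid| ≤ numA))) (fun x => x) false
    let valid_k := PySem.List.sorted ((PySem.List.slice arr (some (j + 1)) none).filter
      (fun x => decide (|x - mid| ≤ numB))) (fun x => x) false
    pvInnerA valid_k numC valid_i 0 0 count) 0

-- ===== PORT B =====
def countBalancedTriplets_alt (arr : List Int) (numA : Int) (numB : Int) (numC : Int) : Int :=
  let n : Int := arr.length
  (PySem.List.pyRange 1 (n - 1) 1).foldl (fun count j =>
    (PySem.List.pyRange 0 j 1).foldl (fun count i =>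
      (PySem.List.pyRange (j + 1) n 1).foldl (fun count k =>
        if |PySem.List.pyGetD arr i 0 - PySem.List.pyGetD arr j 0| ≤ numA ∧
           |PySem.List.pyGetD arr j 0 - PySem.List.pyGetD arr k 0| ≤ numB ∧
           |PySem.List.pyGetD arr i 0 - PySem.List.pyGetD arr k 0| ≤ numC
        then count + 1 else count) count) count) 0

-- ===== PRECONDITION & SPEC =====
-- When numC < 0 and some triple i<j<k has |arr[i]-arr[j]| ≤ numA, |arr[j]-arr[k]| ≤ numB and
-- arr[i]+numC < arr[k] < arr[i]-numC, A's two-pointer window inverts (r < l) and A returns a negative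
-- count; B returns 0, the intended number of triples, since |x-y| ≤ numC is unsatisfiable for numC < 0.
def D_countBalancedTriplets (arr : List Int) (numA : Int) (numB : Int) (numC : Int) : Prop :=
  numC < 0 ∧ ∃ j < arr.length, ∃ v ∈ arr.take j, ∃ x ∈ arr.drop (j + 1),
    |v - arr.getD j 0| ≤ numA ∧ |arr.getD j 0 - x| ≤ numB ∧ v + numC < x ∧ x < v - numC

instance (arr : List Int) (numA : Int) (numB : Int) (numC : Int) : Decidable (D_countBalancedTriplets arr numA numB numC) := by
  unfold D_countBalancedTriplets; infer_instance

def Spec_countBalancedTriplets (arr : List Int) (numA : Int) (numB : Int) (numC : Int) (out : Int) : Prop :=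
  ¬ D_countBalancedTriplets arr numA numB numC → out = countBalancedTriplets_alt arr numA numB numC
instance (arr : List Int) (numA : Int) (numB : Int) (numC : Int) (out : Int) : Decidable (Spec_countBalancedTriplets arr numA numB numC out) := by
  unfold Spec_countBalancedTriplets; infer_instance

def pvDiffWitness_countBalancedTriplets : List Int × Int × Int × Int := ([0, 0, 1], 0, 1, -2)
def pvDiffWitnessOut_countBalancedTriplets : Int × Int := (-1, 0)

-- ===== CLAIM (what is proved, stated in full; the proofs are below) =====
def Claim_unchanged_countBalancedTriplets : Prop := ∀ (arr : List Int) (numA : Int) (numB : Int) (numC : Int), Dom_countBalancedTriplets arr numA numB numC → Spec_countBalancedTriplets arr numA numB numC (countBalancedTriplets arr numA numB numC)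
def Claim_changed_countBalancedTriplets : Prop := Dom_countBalancedTriplets (pvDiffWitness_countBalancedTriplets.1) (pvDiffWitness_countBalancedTriplets.2.1) (pvDiffWitness_countBalancedTriplets.2.2.1) (pvDiffWitness_countBalancedTriplets.2.2.2) ∧ D_countBalancedTriplets (pvDiffWitness_countBalancedTriplets.1) (pvDiffWitness_countBalancedTriplets.2.1) (pvDiffWitness_countBalancedTriplets.2.2.1) (pvDiffWitness_countBalancedTriplets.2.2.2) ∧ countBalancedTriplets (pvDiffWitness_countBalancedTriplets.1) (pvDiffWitness_countBalancedTriplets.2.1) (pvDiffWitness_countBalancedTriplets.2.2.1) (pvDiffWitness_countBalancedTriplets.2.2.2) = pvDiffWitnessOut_countBalancedTriplets.1 ∧ countBalancedTriplets_alt (pvDiffWitness_countBalancedTriplets.1) (pvDiffWitness_countBalancedTriplets.2.1) (pvDiffWitness_countBalancedTriplets.2.2.1) (pvDiffWitness_countBalancedTriplets.2.2.2) = pvDiffWitnessOut_countBalancedTriplets.2 ∧ pvDiffWitnessOut_countBalancedTriplets.1 ≠ pvDiffWitnessOut_countBalancedTriplets.2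

def Claim_exact_countBalancedTriplets : Prop := ∀ (arr : List Int) (numA : Int) (numB : Int) (numC : Int), Dom_countBalancedTriplets arr numA numB numC → D_countBalancedTriplets arr numA numB numC → countBalancedTriplets arr numA numB numC ≠ countBalancedTriplets_alt arr numA numB numC

-- ===== LEMMAS AND PROOFS =====

-- in a ≤-sorted list, the elements satisfying a downward-closed test form a prefix of length countP
theorem pv_sorted_index {vk : List Int} {p : Int → Bool}
    (hs : vk.Pairwise (· ≤ ·)) (hmono : ∀ x y : Int, x ≤ y → p y = true → p x = true)
    {l : Nat} (hl : l < vk.length) : p vk[l] = true ↔ l < vk.countP p := by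
  induction vk generalizing l with
  | nil => simp at hl
  | cons a tl ih =>
    rcases List.pairwise_cons.mp hs with ⟨hrel, htl⟩
    by_cases hpa : p a = true
    · cases l with
      | zero => simp [hpa]
      | succ m =>
        have hm : m < tl.length := by simpa using hl
        have h2 := ih htl (l := m) hm
        simp only [List.getElem_cons_succ, List.countP_cons, hpa, if_true]
        rw [h2]
        omega
    · have htl0 : tl.countP p = 0 := by
        rw [List.countP_eq_zero]
        intro b hb hpb
        exact hpa (hmono a b (hrel b hb) hpb)
      have hc : (a :: tl).countP p = 0 := by simp [hpa, htl0]
      rw [hc]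
      simp only [Nat.not_lt_zero, iff_false]
      cases l with
      | zero => simpa using hpa
      | succ m =>
        have hm : m < tl.length := by simpa using hl
        intro h
        have : tl.countP p = 0 := htl0
        have hmem : tl[m] ∈ tl := List.getElem_mem hm
        have := List.countP_eq_zero.mp htl0 _ hmem
        simp only [List.getElem_cons_succ] at h
        exact this h

theorem pvAdvFuel_eq (vk : List Int) (p : Int → Bool)
    (hs : vk.Pairwise (· ≤ ·)) (hmono : ∀ x y : Int, x ≤ y → p y = true → p x = true)
    (fuel l : Nat) (hf : vk.length ≤ l + fuel) (hl : l ≤ vk.countP p) :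
    pvAdvFuel vk p fuel l = vk.countP p := by
  induction fuel generalizing l with
  | zero =>
    have := vk.countP_le_length (p := p)
    have : l = vk.countP p := by omega
    simpa [pvAdvFuel] using this
  | succ fuel ih =>
    unfold pvAdvFuel
    by_cases h : l < vk.length
    · rw [dif_pos h]
      by_cases hp : p (vk[l]'h) = true
      · rw [if_pos hp]
        have hlt : l < vk.countP p := (pv_sorted_index hs hmono h).mp hp
        exact ih (l + 1) (by omega) (by omega)
      · rw [if_neg hp]
        have : ¬ l < vk.countP p := fun hc => hp ((pv_sorted_index hs hmono h).mpr hc)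
        omega
    · rw [dif_neg h]
      have := vk.countP_le_length (p := p)
      omega

theorem pvAdv_eq (vk : List Int) (p : Int → Bool)
    (hs : vk.Pairwise (· ≤ ·)) (hmono : ∀ x y : Int, x ≤ y → p y = true → p x = true)
    (l : Nat) (hl : l ≤ vk.countP p) : pvAdv vk p l = vk.countP p :=
  pvAdvFuel_eq vk p hs hmono _ l (by omega) hl

-- the inner i_val loop computes count + Σ (countLE (v+numC) - countLT (v-numC))
theorem pvInnerA_eq (vk : List Int) (numC : Int) (vi : List Int)
    (hsk : vk.Pairwise (· ≤ ·)) (hsi : vi.Pairwise (· ≤ ·))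
    (l r : Nat)
    (hl : ∀ v ∈ vi, l ≤ vk.countP (fun x => decide (x < v - numC)))
    (hr : ∀ v ∈ vi, r ≤ vk.countP (fun x => decide (x ≤ v + numC)))
    (count : Int) :
    pvInnerA vk numC vi l r count =
      count + (vi.map (fun v =>
        ((vk.countP (fun x => decide (x ≤ v + numC)) : Int) -
         (vk.countP (fun x => decide (x < v - numC)) : Int)))).sum := by
  induction vi generalizing l r count with
  | nil => simp [pvInnerA]
  | cons v rest ih =>
    rcases List.pairwise_cons.mp hsi with ⟨hrel, hrest⟩
    have hml : ∀ x y : Int, x ≤ y → decide (y < v - numC) = true → decide (x < v - numC) = true := by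
      intro x y hxy hy; simp at hy ⊢; omega
    have hmr : ∀ x y : Int, x ≤ y → decide (y ≤ v + numC) = true → decide (x ≤ v + numC) = true := by
      intro x y hxy hy; simp at hy ⊢; omega
    have hl' := pvAdv_eq vk _ hsk hml l (hl v (List.mem_cons_self))
    have hr' := pvAdv_eq vk _ hsk hmr r (hr v (List.mem_cons_self))
    simp only [pvInnerA, hl', hr']
    rw [ih hrest _ _
      (fun w hw => List.countP_mono_left (fun x _ hx => by
        have hvw : v ≤ w := hrel w hw
        simp at hx ⊢; omega))
      (fun w hw => List.countP_mono_left (fun x _ hx => by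
        have hvw : v ≤ w := hrel w hw
        simp at hx ⊢; omega))]
    simp [List.map_cons, List.sum_cons]
    ring

-- countLE (v+numC) - countLT (v-numC) = # of x with |v - x| ≤ numC, provided nothing lies strictly
-- between v+numC and v-numC
theorem pv_term_eq (vk : List Int) (v numC : Int)
    (H : ∀ x ∈ vk, ¬ (v + numC < x ∧ x < v - numC)) :
    ((vk.countP (fun x => decide (x ≤ v + numC)) : Int) -
     (vk.countP (fun x => decide (x < v - numC)) : Int)) =
      (vk.countP (fun x => decide (|v - x| ≤ numC)) : Int) := by
  induction vk with
  | nil => simp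
  | cons a tl ih =>
    have ha := H a (List.mem_cons_self)
    have htl := ih (fun x hx => H x (List.mem_cons_of_mem _ hx))
    have habs : (|v - a| ≤ numC) ↔ (v - numC ≤ a ∧ a ≤ v + numC) := by rw [abs_le]; omega
    simp only [List.countP_cons, decide_eq_true_eq, habs]
    split_ifs <;> push_cast <;> omega

-- Σ over a filtered list as Σ of an if over the whole list
theorem pv_sum_filter_eq (l : List Int) (p : Int → Bool) (f : Int → Int) :
    ((l.filter p).map f).sum = (l.map (fun v => if p v then f v else 0)).sum := by
  induction l with
  | nil => rfl
  | cons a tl ih =>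
    by_cases hpa : p a = true <;> simp [hpa, ih]

-- the canonical per-j contribution both step functions are reduced to
def pvE (arr : List Int) (numA numB numC : Int) (jn : Nat) : Int :=
  ((arr.take jn).map (fun v =>
    (((arr.drop (jn + 1)).countP (fun x =>
      decide (|v - arr.getD jn 0| ≤ numA) &&
      (decide (|arr.getD jn 0 - x| ≤ numB) && decide (|v - x| ≤ numC)))) : Int))).sum

-- the raw per-j sum A's inner loop computes (no hypothesis on numC)
def pvSraw (arr : List Int) (numA numB numC : Int) (jn : Nat) : Int :=
  ((PySem.List.sorted ((arr.take jn).filter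
      (fun x => decide (|x - arr.getD jn 0| ≤ numA))) (fun x => x) false).map (fun v =>
    (((PySem.List.sorted ((arr.drop (jn + 1)).filter
        (fun x => decide (|x - arr.getD jn 0| ≤ numB))) (fun x => x) false).countP
          (fun x => decide (x ≤ v + numC)) : Int) -
     ((PySem.List.sorted ((arr.drop (jn + 1)).filter
        (fun x => decide (|x - arr.getD jn 0| ≤ numB))) (fun x => x) false).countP
          (fun x => decide (x < v - numC)) : Int)))).sum

theorem pvA_raw (arr : List Int) (numA numB numC : Int) (jn : Nat) (count : Int) :
    pvInnerA
      (PySem.List.sorted ((arr.drop (jn + 1)).filter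
        (fun x => decide (|x - arr.getD jn 0| ≤ numB))) (fun x => x) false)
      numC
      (PySem.List.sorted ((arr.take jn).filter
        (fun x => decide (|x - arr.getD jn 0| ≤ numA))) (fun x => x) false)
      0 0 count
    = count + pvSraw arr numA numB numC jn := by
  rw [pvInnerA_eq _ numC _ (PySem.List.sorted_pairwise _ _) (PySem.List.sorted_pairwise _ _)
    0 0 (fun _ _ => Nat.zero_le _) (fun _ _ => Nat.zero_le _) count]
  rfl

theorem pvSraw_eq_pvE (arr : List Int) (numA numB numC : Int) (jn : Nat)
    (H : ∀ v ∈ arr.take jn, |v - arr.getD jn 0| ≤ numA →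
         ∀ x ∈ arr.drop (jn + 1), |arr.getD jn 0 - x| ≤ numB →
         ¬ (v + numC < x ∧ x < v - numC)) :
    pvSraw arr numA numB numC jn = pvE arr numA numB numC jn := by
  unfold pvSraw
  set m := arr.getD jn 0 with hm
  set L := arr.take jn with hL
  set R := arr.drop (jn + 1) with hR
  set pA : Int → Bool := fun x => decide (|x - m| ≤ numA) with hpA
  set pB : Int → Bool := fun x => decide (|x - m| ≤ numB) with hpB
  set vk := PySem.List.sorted (R.filter pB) (fun x => x) false with hvk
  set vi := PySem.List.sorted (L.filter pA) (fun x => x) false with hvi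
  -- termwise: two-pointer window count = countP of the |v-x| ≤ numC test
  have hterm : ∀ v ∈ vi,
      ((vk.countP (fun x => decide (x ≤ v + numC)) : Int) -
       (vk.countP (fun x => decide (x < v - numC)) : Int)) =
      (vk.countP (fun x => decide (|v - x| ≤ numC)) : Int) := by
    intro v hv
    apply pv_term_eq
    intro x hx hbad
    have hvL : v ∈ L.filter pA := (PySem.List.mem_sorted _ _ _ _).mp hv
    have hxR : x ∈ R.filter pB := (PySem.List.mem_sorted _ _ _ _).mp hx
    have hvL' := List.mem_filter.mp hvL
    have hxR' := List.mem_filter.mp hxR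
    exact H v hvL'.1 (by simpa [hpA] using hvL'.2) x hxR'.1 (by have := hxR'.2; simp only [hpB, decide_eq_true_eq] at this; rw [abs_sub_comm]; exact this) hbad
  rw [List.map_congr_left hterm]
  -- drop the sort on vk inside each term, then on vi for the outer sum
  have hvkP : ∀ v : Int, vk.countP (fun x => decide (|v - x| ≤ numC)) =
      R.countP (fun x => decide (|v - x| ≤ numC) && pB x) := by
    intro v
    rw [(PySem.List.sorted_perm (R.filter pB) (fun x => x) false).countP_eq, List.countP_filter]
  have h1 : (vi.map (fun v => ((vk.countP (fun x => decide (|v - x| ≤ numC))) : Int))).sum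
      = ((L.filter pA).map (fun v => ((R.countP (fun x => decide (|v - x| ≤ numC) && pB x)) : Int))).sum := by
    rw [List.map_congr_left (fun v _ => by rw [hvkP v])]
    exact List.Perm.sum_eq (List.Perm.map _ (PySem.List.sorted_perm _ _ _))
  rw [h1, pv_sum_filter_eq]
  unfold pvE
  rw [← hm, ← hL, ← hR]
  apply congrArg
  apply List.map_congr_left
  intro v _
  by_cases hA : pA v = true
  · rw [if_pos (by simpa [hpA] using hA)]
    congr 1
    apply List.countP_congr
    intro x _
    have : pA v = true := hA
    simp only [hpA] at this
    simp only [hpB, this, Bool.true_and]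
    rw [abs_sub_comm m x]
    rw [Bool.and_comm]
  · rw [if_neg (by simpa [hpA] using hA)]
    have hfalse : ¬ (|v - m| ≤ numA) := by simpa [hpA] using hA
    have hz : R.countP (fun x => decide (|v - m| ≤ numA) &&
        (decide (|m - x| ≤ numB) && decide (|v - x| ≤ numC))) = 0 := by
      rw [List.countP_eq_zero]
      intro x _
      simp [hfalse]
    rw [hz]
    simp

theorem pvB_step (arr : List Int) (numA numB numC : Int) (jn : Nat) (count : Int)
    (h2 : jn + 1 ≤ arr.length) :
    (PySem.List.pyRange 0 (jn : Int) 1).foldl (fun count i =>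
      (PySem.List.pyRange ((jn : Int) + 1) ((arr.length : Int)) 1).foldl (fun count k =>
        if |PySem.List.pyGetD arr i 0 - arr.getD jn 0| ≤ numA ∧
           |arr.getD jn 0 - PySem.List.pyGetD arr k 0| ≤ numB ∧
           |PySem.List.pyGetD arr i 0 - PySem.List.pyGetD arr k 0| ≤ numC
        then count + 1 else count) count) count
    = count + pvE arr numA numB numC jn := by
  -- reduce the innermost k-loop for each i to count + countP over arr.drop (jn+1)
  have hinner : ∀ (c : Int) (v : Int),
      (PySem.List.pyRange ((jn : Int) + 1) ((arr.length : Int)) 1).foldl (fun count k =>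
        if |v - arr.getD jn 0| ≤ numA ∧
           |arr.getD jn 0 - PySem.List.pyGetD arr k 0| ≤ numB ∧
           |v - PySem.List.pyGetD arr k 0| ≤ numC
        then count + 1 else count) c
      = c + (((arr.drop (jn + 1)).countP (fun x =>
          decide (|v - arr.getD jn 0| ≤ numA) &&
          (decide (|arr.getD jn 0 - x| ≤ numB) && decide (|v - x| ≤ numC)))) : Int) := by
    intro c v
    have hcast : ((jn : Int) + 1) = (((jn + 1 : Nat)) : Int) := by push_cast; ring
    rw [hcast]
    rw [PySem.List.foldl_pyRange_pyGetD' arr 0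
      (fun count x => if |v - arr.getD jn 0| ≤ numA ∧ |arr.getD jn 0 - x| ≤ numB ∧ |v - x| ≤ numC
        then count + 1 else count) c (by positivity)]
    rw [Int.toNat_natCast]
    rw [PySem.List.foldl_ite_add_one
      (fun x => |v - arr.getD jn 0| ≤ numA ∧ |arr.getD jn 0 - x| ≤ numB ∧ |v - x| ≤ numC)
      (arr.drop (jn + 1)) c]
    congr 1
    congr 1
    apply List.countP_congr
    intro x _
    simp
  rw [PySem.List.foldl_congr_mem _ _
    (fun count i => count + (((arr.drop (jn + 1)).countP (fun x =>
        decide (|PySem.List.pyGetD (arr.take jn) i 0 - arr.getD jn 0| ≤ numA) &&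
        (decide (|arr.getD jn 0 - x| ≤ numB) &&
         decide (|PySem.List.pyGetD (arr.take jn) i 0 - x| ≤ numC)))) : Int))
    count ?_]
  · have hlen : ((arr.take jn).length : Int) = (jn : Int) := by
      rw [List.length_take]; omega
    rw [show PySem.List.pyRange 0 (jn : Int) 1 =
        PySem.List.pyRange 0 (((arr.take jn).length : Int)) 1 by rw [hlen]]
    rw [PySem.List.foldl_pyRange_zero_pyGetD' (arr.take jn) 0
      (fun count v => count + (((arr.drop (jn + 1)).countP (fun x =>
        decide (|v - arr.getD jn 0| ≤ numA) &&
        (decide (|arr.getD jn 0 - x| ≤ numB) && decide (|v - x| ≤ numC)))) : Int)) count]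
    rw [PySem.List.foldl_add]
    rfl
  · intro acc i hi
    rw [PySem.List.mem_pyRange_one] at hi
    have hgl : PySem.List.pyGetD arr i 0 = PySem.List.pyGetD (arr.take jn) i 0 := by
      obtain ⟨it, rfl⟩ : ∃ k : Nat, i = (k : Int) := ⟨i.toNat, by omega⟩
      rw [PySem.List.pyGetD_natCast, PySem.List.pyGetD_natCast]
      have hit : it < jn := by omega
      have hit2 : it < arr.length := by omega
      rw [List.getD_eq_getElem _ _ hit2, List.getD_eq_getElem _ _ (by simpa [List.length_take] using by omega : it < (arr.take jn).length)]
      exact (List.getElem_take).symm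
    rw [hgl, hinner acc _]

theorem countBalancedTriplets_spec' (arr : List Int) (numA numB numC : Int)
    (hD : ¬ D_countBalancedTriplets arr numA numB numC) :
    countBalancedTriplets arr numA numB numC = countBalancedTriplets_alt arr numA numB numC := by
  unfold countBalancedTriplets countBalancedTriplets_alt
  apply PySem.List.foldl_congr_mem
  intro count j hj
  rw [PySem.List.mem_pyRange_one] at hj
  obtain ⟨hj1, hj2⟩ := hj
  obtain ⟨jn, rfl⟩ : ∃ k : Nat, j = (k : Int) := ⟨j.toNat, by omega⟩
  have hjlen : jn + 1 < arr.length := by omega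
  have hj1n : 1 ≤ jn := by omega
  -- A: resolve the slices and mid, then apply the two step lemmas
  have hmid : PySem.List.pyGetD arr ((jn : Nat) : Int) 0 = arr.getD jn 0 := PySem.List.pyGetD_natCast arr jn 0
  have hs1 : PySem.List.slice arr none (some ((jn : Nat) : Int)) = arr.take jn := by
    rw [PySem.List.slice_to arr (by positivity), Int.toNat_natCast]
  have hs2 : PySem.List.slice arr (some (((jn : Nat) : Int) + 1)) none = arr.drop (jn + 1) := by
    rw [show (((jn : Nat) : Int) + 1) = (((jn + 1 : Nat)) : Int) by push_cast; ring]
    rw [PySem.List.slice_from arr (by positivity), Int.toNat_natCast]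
  rw [hmid, hs1, hs2]
  dsimp only
  rw [pvA_raw arr numA numB numC jn count, pvSraw_eq_pvE arr numA numB numC jn ?_, pvB_step arr numA numB numC jn count (by omega)]
  intro v hv hvA x hx hxB hbad
  apply hD
  unfold D_countBalancedTriplets
  refine ⟨by omega, jn, by omega, v, hv, x, hx, hvA, hxB, hbad.1, hbad.2⟩

theorem pv_foldl_id {α : Type} (l : List α) (c : Int) : l.foldl (fun c _ => c) c = c := by
  induction l generalizing c with
  | nil => rfl
  | cons a t ih => exact ih c

theorem pv_sum_nonpos (l : List Int) (h : ∀ y ∈ l, y ≤ 0) : l.sum ≤ 0 := by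
  induction l with
  | nil => simp
  | cons a t ih =>
    have ha := h a (List.mem_cons_self)
    have ht := ih (fun y hy => h y (List.mem_cons_of_mem _ hy))
    simp only [List.sum_cons]
    omega

theorem pv_sum_le_neg_one (l : List Int) (h : ∀ y ∈ l, y ≤ 0) {x : Int} (hx : x ∈ l)
    (hxn : x ≤ -1) : l.sum ≤ -1 := by
  obtain ⟨s, t, rfl⟩ := List.append_of_mem hx
  have hs := pv_sum_nonpos s (fun y hy => h y (List.mem_append_left _ hy))
  have ht := pv_sum_nonpos t (fun y hy => h y (List.mem_append_right _ (List.mem_cons_of_mem _ hy)))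
  simp only [List.sum_append, List.sum_cons]
  omega

theorem pv_countP_lt (l : List Int) (p q : Int → Bool) (h : ∀ x ∈ l, p x = true → q x = true)
    {x₀ : Int} (hx : x₀ ∈ l) (hpx : ¬ p x₀ = true) (hqx : q x₀ = true) :
    l.countP p < l.countP q := by
  obtain ⟨s, t, rfl⟩ := List.append_of_mem hx
  have hs : s.countP p ≤ s.countP q := List.countP_mono_left (fun x hxm => h x (List.mem_append_left _ hxm))
  have ht : t.countP p ≤ t.countP q := List.countP_mono_left (fun x hxm => h x (List.mem_append_right _ (List.mem_cons_of_mem _ hxm)))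
  simp only [List.countP_append, List.countP_cons, hqx, hpx]
  simp only [Bool.false_eq_true, if_false, if_true]
  omega

-- B returns 0 whenever numC < 0: the third condition |arr[i]-arr[k]| ≤ numC can never hold
theorem pvB_zero (arr : List Int) (numA numB numC : Int) (hC : numC < 0) :
    countBalancedTriplets_alt arr numA numB numC = 0 := by
  unfold countBalancedTriplets_alt
  rw [PySem.List.foldl_congr_mem _ _ (fun c _ => c) 0 ?_, pv_foldl_id]
  intro acc j _
  rw [PySem.List.foldl_congr_mem _ _ (fun c _ => c) acc ?_, pv_foldl_id]
  intro acc2 i _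
  rw [PySem.List.foldl_congr_mem _ _ (fun c _ => c) acc2 ?_, pv_foldl_id]
  intro acc3 k _
  rw [if_neg]
  intro hcond
  have habs := abs_nonneg (PySem.List.pyGetD arr i 0 - PySem.List.pyGetD arr k 0)
  have := hcond.2.2
  omega

theorem pvSraw_nonpos (arr : List Int) (numA numB numC : Int) (jn : Nat) (hC : numC < 0) :
    pvSraw arr numA numB numC jn ≤ 0 := by
  unfold pvSraw
  apply pv_sum_nonpos
  intro y hy
  obtain ⟨v, _, rfl⟩ := List.mem_map.mp hy
  have hmono : ∀ x ∈ (PySem.List.sorted ((arr.drop (jn + 1)).filter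
      (fun x => decide (|x - arr.getD jn 0| ≤ numB))) (fun x => x) false),
      (fun x => decide (x ≤ v + numC)) x = true → (fun x => decide (x < v - numC)) x = true := by
    intro x _ hx
    simp only [decide_eq_true_eq] at hx ⊢
    omega
  have := List.countP_mono_left hmono
  omega

theorem pvSraw_le_neg_one (arr : List Int) (numA numB numC : Int) (jn : Nat)
    {v₀ x₀ : Int} (hv₀ : v₀ ∈ arr.take jn) (hA₀ : |v₀ - arr.getD jn 0| ≤ numA)
    (hx₀ : x₀ ∈ arr.drop (jn + 1)) (hB₀ : |arr.getD jn 0 - x₀| ≤ numB)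
    (h1 : v₀ + numC < x₀) (h2 : x₀ < v₀ - numC) :
    pvSraw arr numA numB numC jn ≤ -1 := by
  unfold pvSraw
  set vk := PySem.List.sorted ((arr.drop (jn + 1)).filter
      (fun x => decide (|x - arr.getD jn 0| ≤ numB))) (fun x => x) false with hvk
  apply pv_sum_le_neg_one _ ?_ (List.mem_map_of_mem
    ((PySem.List.mem_sorted _ _ _ _).mpr (List.mem_filter.mpr ⟨hv₀, by simpa using hA₀⟩)))
  · have hxk : x₀ ∈ vk := (PySem.List.mem_sorted _ _ _ _).mpr
      (List.mem_filter.mpr ⟨hx₀, by simp only [decide_eq_true_eq]; rw [abs_sub_comm]; exact hB₀⟩)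
    have hlt := pv_countP_lt vk (fun x => decide (x ≤ v₀ + numC)) (fun x => decide (x < v₀ - numC))
      (fun x _ hx => by simp only [decide_eq_true_eq] at hx ⊢; omega) hxk
      (by simp only [decide_eq_true_eq]; omega) (by simp only [decide_eq_true_eq]; omega)
    omega
  · intro y hy
    obtain ⟨v, _, rfl⟩ := List.mem_map.mp hy
    have hmono : ∀ x ∈ vk, (fun x => decide (x ≤ v + numC)) x = true →
        (fun x => decide (x < v - numC)) x = true := by
      intro x _ hx
      simp only [decide_eq_true_eq] at hx ⊢
      omega
    have := List.countP_mono_left hmono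
    omega

-- A reduces to the sum of the raw per-j contributions
theorem pvA_sum (arr : List Int) (numA numB numC : Int) :
    countBalancedTriplets arr numA numB numC =
      ((PySem.List.pyRange 1 ((arr.length : Int) - 1) 1).map
        (fun j => pvSraw arr numA numB numC j.toNat)).sum := by
  unfold countBalancedTriplets
  rw [PySem.List.foldl_congr_mem _ _
    (fun count j => count + pvSraw arr numA numB numC j.toNat) 0 ?_]
  · rw [PySem.List.foldl_add]
    simp
  · intro count j hj
    rw [PySem.List.mem_pyRange_one] at hj
    obtain ⟨hj1, hj2⟩ := hj
    obtain ⟨jn, rfl⟩ : ∃ k : Nat, j = (k : Int) := ⟨j.toNat, by omega⟩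
    have hmid : PySem.List.pyGetD arr ((jn : Nat) : Int) 0 = arr.getD jn 0 := PySem.List.pyGetD_natCast arr jn 0
    have hs1 : PySem.List.slice arr none (some ((jn : Nat) : Int)) = arr.take jn := by
      rw [PySem.List.slice_to arr (by positivity), Int.toNat_natCast]
    have hs2 : PySem.List.slice arr (some (((jn : Nat) : Int) + 1)) none = arr.drop (jn + 1) := by
      rw [show (((jn : Nat) : Int) + 1) = (((jn + 1 : Nat)) : Int) by push_cast; ring]
      rw [PySem.List.slice_from arr (by positivity), Int.toNat_natCast]
    rw [hmid, hs1, hs2]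
    dsimp only
    rw [pvA_raw arr numA numB numC jn count, Int.toNat_natCast]

-- ===== VERDICT (by name: the statement is the Claim_ definition above) =====
theorem countBalancedTriplets_spec : Claim_unchanged_countBalancedTriplets := by
  intro arr numA numB numC _ hD
  exact countBalancedTriplets_spec' arr numA numB numC hD

theorem countBalancedTriplets_changed : Claim_changed_countBalancedTriplets := by
  unfold Claim_changed_countBalancedTriplets; decide

theorem countBalancedTriplets_tight : Claim_exact_countBalancedTriplets := by
  intro arr numA numB numC _ hD
  obtain ⟨hC, j₀, hjlt, v₀, hv₀, x₀, hx₀, hA₀, hB₀, h1, h2⟩ := hD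
  rw [pvB_zero arr numA numB numC hC]
  have hj1 : 1 ≤ j₀ := by
    rcases Nat.eq_zero_or_pos j₀ with h | h
    · subst h; simp at hv₀
    · omega
  have hjlen : j₀ + 1 < arr.length := by
    by_contra h
    rw [List.drop_eq_nil_of_le (by omega)] at hx₀
    simp at hx₀
  have hA : countBalancedTriplets arr numA numB numC ≤ -1 := by
    rw [pvA_sum]
    apply pv_sum_le_neg_one _ ?_ (List.mem_map_of_mem
      (a := ((j₀ : Nat) : Int))
      (by rw [PySem.List.mem_pyRange_one]; omega))
    · rw [Int.toNat_natCast]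
      exact pvSraw_le_neg_one arr numA numB numC j₀ hv₀ hA₀ hx₀ hB₀ h1 h2
    · intro y hy
      obtain ⟨j, _, rfl⟩ := List.mem_map.mp hy
      exact pvSraw_nonpos arr numA numB numC j.toNat hC
  omega
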